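-- pv_equiv track=rewrite | github.com/abundrew/hackerrank | solutions/highway_construction.py | highwayConstruction
-- ===== SOURCE A (Python) =====
-- def Mul(a, b, modulus):
--     return (a * b) % modulus
--
-- def Div(a, b, modulus):
--     return (a * Inv(b, modulus)) % modulus
--
-- def Inv(a, modulus):
--     b = modulus
--     p, q = 1, 0
--     while b > 0:
--         c, d = a // b, a
--         a, b = b, d % b
--         d = p
--         p, q = q, d - c * q
--     return (p + modulus) if p < 0 else p
--
-- def highwayConstruction(n, K, B, R):
--     sum = 0
--     if n > 2:
--         b, n1 = 1, (n - 1) % R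
--         for k in range(K, -1, -1):
--             b = Mul(Div(Mul(b, k + 1, R), K - k + 1, R), n1, R)
--             sum = (sum + Mul(b, B[k], R)) % R
--         sum = (R + Div(sum, K + 1, R) - 1) % R
--     return sum
-- ===== SOURCE B (Python) =====
-- def _inv(a, modulus):
--     b = modulus
--     p, q = 1, 0
--     while b > 0:
--         c, d = a // b, a
--         a, b = b, d % b
--         d = p
--         p, q = q, d - c * q
--     return (p + modulus) if p < 0 else p
--
-- def _scan(init, xs, R):
--     # prefix products mod R
--     out = []
--     for x in xs:
--         init = init * x % R
--         out.append(init)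
--     return out
--
-- def highwayConstruction(n, K, B, R):
--     # staged passes: build three prefix-product tables, then one zip-sum pass
--     if n <= 2:
--         return 0
--     m = K + 1
--     n1 = (n - 1) % R
--     fall = _scan(1, [m + 1 - j for j in range(1, m + 1)], R)   # falling factorial
--     qinv = _scan(1, [_inv(j, R) for j in range(1, m + 1)], R)  # inverse prefix products
--     pw = _scan(1, [n1] * m, R)                                 # powers of n-1
--     s = 0
--     for p, q, e, x in zip(fall, qinv, pw, reversed(B[:m])):
--         s = (s + p * q % R * e % R * x) % R
--     return (R + s * _inv(m, R) % R - 1) % R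
-- ===== Notes on version B (the rewrite author's own statement) =====
-- stated objective: alternative
-- what changed: B replaces A's single backward loop, which chains one accumulator through a multiply / modular-divide / multiply-by-(n-1) update per step, by staged passes: it first builds three explicit prefix-product tables (falling factorial, inverse prefix products, powers of n-1) with a reusable scan helper, then computes the sum in one zip pass over the tables and the reversed coefficient slice, with no modular division helper at all.
import Mathlib
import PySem

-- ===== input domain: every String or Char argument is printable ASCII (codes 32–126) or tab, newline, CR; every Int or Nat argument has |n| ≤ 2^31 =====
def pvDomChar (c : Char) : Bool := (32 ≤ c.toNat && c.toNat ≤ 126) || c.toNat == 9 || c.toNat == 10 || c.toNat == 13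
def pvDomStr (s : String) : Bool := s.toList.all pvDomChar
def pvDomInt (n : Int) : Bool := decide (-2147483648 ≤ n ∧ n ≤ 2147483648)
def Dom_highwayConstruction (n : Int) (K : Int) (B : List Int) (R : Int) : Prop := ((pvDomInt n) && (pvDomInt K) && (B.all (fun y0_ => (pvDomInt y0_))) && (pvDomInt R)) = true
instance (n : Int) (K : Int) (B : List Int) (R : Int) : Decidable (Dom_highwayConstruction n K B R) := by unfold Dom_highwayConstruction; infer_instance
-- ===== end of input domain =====

-- B replaces A's single backward loop (chained accumulator with a modular division per
-- step) by staged passes: three prefix-product tables built first, then one zip-sum pass;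
-- an alternative decomposition of the same modular sum, same asymptotic cost.


-- ===== PORT A =====
-- helper: Python's Inv (iterative extended Euclid); Source B's _inv is the same code
def pyInvLoop (a b p q : Int) : Int :=
  if h : 0 < b then
    pyInvLoop b (PySem.Int.mod a b) q (p - PySem.Int.floordiv a b * q)
  else p
termination_by b.toNat
decreasing_by
  have h1 := PySem.Int.mod_nonneg a h
  have h2 := PySem.Int.mod_lt a h
  omega

def pyInv (a modulus : Int) : Int :=
  let p := pyInvLoop a modulus 1 0
  if p < 0 then p + modulus else p

def pyMul (a b modulus : Int) : Int := PySem.Int.mod (a * b) modulus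

def pyDiv (a b modulus : Int) : Int := PySem.Int.mod (a * pyInv b modulus) modulus

def highwayConstruction (n : Int) (K : Int) (B : List Int) (R : Int) : Int :=
  if n > 2 then
    let n1 := PySem.Int.mod (n - 1) R
    let st := (PySem.List.pyRange K (-1) (-1)).foldl
      (fun (st : Int × Int) k =>
        let b := pyMul (pyDiv (pyMul st.1 (k + 1) R) (K - k + 1) R) n1 R
        (b, PySem.Int.mod (st.2 + pyMul b (PySem.List.pyGetD B k 0) R) R))
      (1, 0)
    PySem.Int.mod (R + pyDiv st.2 (K + 1) R - 1) R
  else 0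

-- ===== PORT B =====
-- Source B's _scan: prefix products mod R
def scanMod (init : Int) (xs : List Int) (R : Int) : List Int :=
  match xs with
  | [] => []
  | x :: rest =>
    let v := PySem.Int.mod (init * x) R
    v :: scanMod v rest R

def highwayConstruction_alt (n : Int) (K : Int) (B : List Int) (R : Int) : Int :=
  if n ≤ 2 then 0
  else
    let m := K + 1
    let n1 := PySem.Int.mod (n - 1) R
    let fall := scanMod 1 ((PySem.List.pyRange 1 (m + 1) 1).map (fun j => m + 1 - j)) R
    let qinv := scanMod 1 ((PySem.List.pyRange 1 (m + 1) 1).map (fun j => pyInv j R)) R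
    let pw := scanMod 1 (PySem.List.pyRepeat [n1] m) R
    let s := (List.zip fall (List.zip qinv (List.zip pw
        (PySem.List.slice B none (some m)).reverse))).foldl
      (fun s t =>
        PySem.Int.mod (s + PySem.Int.mod (PySem.Int.mod (t.1 * t.2.1) R * t.2.2.1) R * t.2.2.2) R)
      0
    PySem.Int.mod (R + PySem.Int.mod (s * pyInv m R) R - 1) R

-- ===== PRECONDITION & SPEC =====
-- Pre_ excludes exactly the inputs where Python A raises: with n > 2, R = 0 gives
-- ZeroDivisionError in (n-1) % R, and K ≥ len(B) (with K ≥ 0) gives IndexError at B[k].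
def Pre_highwayConstruction (n : Int) (K : Int) (B : List Int) (R : Int) : Prop :=
  n ≤ 2 ∨ (R ≠ 0 ∧ (K < 0 ∨ K < (B.length : Int)))
instance (n : Int) (K : Int) (B : List Int) (R : Int) : Decidable (Pre_highwayConstruction n K B R) := by unfold Pre_highwayConstruction; infer_instance

def pvWitness_highwayConstruction : Int × Int × List Int × Int := (5, 2, [1, 2, 3], 7)

def Spec_highwayConstruction (n : Int) (K : Int) (B : List Int) (R : Int) (out : Int) : Prop := out = highwayConstruction_alt n K B R
instance (n : Int) (K : Int) (B : List Int) (R : Int) (out : Int) : Decidable (Spec_highwayConstruction n K B R out) := by unfold Spec_highwayConstruction; infer_instance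

-- ===== CLAIM (what is proved, stated in full; the proofs are below) =====
def Claim_equal_highwayConstruction : Prop := ∀ (n : Int) (K : Int) (B : List Int) (R : Int), Dom_highwayConstruction n K B R → Pre_highwayConstruction n K B R → Spec_highwayConstruction n K B R (highwayConstruction n K B R)

-- ===== LEMMAS AND PROOFS =====

-- Python's % respects congruence: congruent inputs give the same remainder (any modulus).
lemma pymod_congr {R x y : Int} (h : Int.ModEq R x y) :
    PySem.Int.mod x R = PySem.Int.mod y R := by
  unfold PySem.Int.mod
  rw [Int.fmod_eq_emod, Int.fmod_eq_emod, h]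
  congr 2
  rw [Int.dvd_iff_emod_eq_zero, Int.dvd_iff_emod_eq_zero, h]

-- Python's % returns a value congruent to its argument.
lemma pymod_modeq (x R : Int) : Int.ModEq R (PySem.Int.mod x R) x := by
  unfold PySem.Int.mod Int.ModEq
  have h : x.fmod R = x - R * x.fdiv R := by
    linarith [Int.fmod_add_mul_fdiv x R]
  rw [h, Int.sub_mul_emod_self_left]

-- A's countdown range is the ascending range reflected through j ↦ K + 1 - j.
lemma range_reflect (K : Int) :
    PySem.List.pyRange K (-1) (-1)
      = (PySem.List.pyRange 1 (K + 2) 1).map (fun j => K + 1 - j) := by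
  rw [PySem.List.pyRange_neg_one, PySem.List.pyRange_one, List.map_map]
  have hlen : (K - (-1)).toNat = (K + 2 - 1).toNat := by omega
  rw [hlen]
  apply List.map_congr_left
  intro k _
  simp only [Function.comp_apply]
  ring

-- Loop invariant: A's accumulator b is congruent to the product p*q*e of the three
-- staged factors, and the running sums are equal (reference fold over a 4-tuple state).
lemma loop_rel (K R n1 : Int) (B : List Int) :
    ∀ (js : List Int) (b s p q e : Int), Int.ModEq R b (p * q * e) →
      ((js.map (fun j => K + 1 - j)).foldl
        (fun (st : Int × Int) k =>
          (pyMul (pyDiv (pyMul st.1 (k + 1) R) (K - k + 1) R) n1 R,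
            PySem.Int.mod
              (st.2 + pyMul (pyMul (pyDiv (pyMul st.1 (k + 1) R) (K - k + 1) R) n1 R)
                (PySem.List.pyGetD B k 0) R) R))
        (b, s)).2
      = (js.foldl
          (fun (st : Int × Int × Int × Int) j =>
            (PySem.Int.mod (st.1 * (K + 2 - j)) R,
              PySem.Int.mod (st.2.1 * pyInv j R) R,
              PySem.Int.mod (st.2.2.1 * n1) R,
              PySem.Int.mod
                (st.2.2.2 + PySem.Int.mod
                    (PySem.Int.mod
                      (PySem.Int.mod (st.1 * (K + 2 - j)) R
                        * PySem.Int.mod (st.2.1 * pyInv j R) R) R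
                      * PySem.Int.mod (st.2.2.1 * n1) R) R
                  * PySem.List.pyGetD B (K + 1 - j) 0) R))
          (p, q, e, s)).2.2.2 := by
  intro js
  induction js with
  | nil => intro b s p q e h; rfl
  | cons j js ih =>
    intro b s p q e h
    simp only [List.map_cons, List.foldl_cons]
    have harg : K - (K + 1 - j) + 1 = j := by ring
    have harg2 : K + 1 - j + 1 = K + 2 - j := by ring
    set I := pyInv j R with hI
    set p' := PySem.Int.mod (p * (K + 2 - j)) R with hp'
    set q' := PySem.Int.mod (q * I) R with hq'
    set e' := PySem.Int.mod (e * n1) R with he'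
    set bA := pyMul (pyDiv (pyMul b (K + 1 - j + 1) R) (K - (K + 1 - j) + 1) R) n1 R with hbA
    have hb' : Int.ModEq R bA (p' * q' * e') := by
      have h1 : Int.ModEq R bA (b * (K + 2 - j) * I * n1) := by
        rw [hbA, harg, harg2]
        unfold pyMul pyDiv
        calc PySem.Int.mod (PySem.Int.mod (PySem.Int.mod (b * (K + 2 - j)) R * pyInv j R) R * n1) R
            ≡ PySem.Int.mod (PySem.Int.mod (b * (K + 2 - j)) R * pyInv j R) R * n1 [ZMOD R] := pymod_modeq _ _
          _ ≡ (PySem.Int.mod (b * (K + 2 - j)) R * pyInv j R) * n1 [ZMOD R] := Int.ModEq.mul_right _ (pymod_modeq _ _)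
          _ ≡ (b * (K + 2 - j) * pyInv j R) * n1 [ZMOD R] := Int.ModEq.mul_right _ (Int.ModEq.mul_right _ (pymod_modeq _ _))
      have h2 : Int.ModEq R (p' * q' * e') (p * (K + 2 - j) * (q * I) * (e * n1)) := by
        exact Int.ModEq.mul (Int.ModEq.mul (pymod_modeq _ _) (pymod_modeq _ _)) (pymod_modeq _ _)
      have h3 : Int.ModEq R (b * (K + 2 - j) * I * n1) (p * (K + 2 - j) * (q * I) * (e * n1)) := by
        have : Int.ModEq R (b * (K + 2 - j) * I * n1) (p * q * e * (K + 2 - j) * I * n1) :=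
          Int.ModEq.mul_right _ (Int.ModEq.mul_right _ (Int.ModEq.mul_right _ h))
        calc b * (K + 2 - j) * I * n1 ≡ p * q * e * (K + 2 - j) * I * n1 [ZMOD R] := this
          _ = p * (K + 2 - j) * (q * I) * (e * n1) := by ring
      exact (h1.trans h3).trans h2.symm
    have hs : PySem.Int.mod (s + pyMul bA (PySem.List.pyGetD B (K + 1 - j) 0) R) R
        = PySem.Int.mod (s + PySem.Int.mod (PySem.Int.mod (p' * q') R * e') R
            * PySem.List.pyGetD B (K + 1 - j) 0) R := by
      apply pymod_congr
      apply Int.ModEq.add_left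
      have hA : Int.ModEq R (pyMul bA (PySem.List.pyGetD B (K + 1 - j) 0) R)
          (p' * q' * e' * PySem.List.pyGetD B (K + 1 - j) 0) := by
        unfold pyMul
        calc PySem.Int.mod (bA * PySem.List.pyGetD B (K + 1 - j) 0) R
            ≡ bA * PySem.List.pyGetD B (K + 1 - j) 0 [ZMOD R] := pymod_modeq _ _
          _ ≡ p' * q' * e' * PySem.List.pyGetD B (K + 1 - j) 0 [ZMOD R] := Int.ModEq.mul_right _ hb'
      have hB : Int.ModEq R (PySem.Int.mod (PySem.Int.mod (p' * q') R * e') R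
            * PySem.List.pyGetD B (K + 1 - j) 0)
          (p' * q' * e' * PySem.List.pyGetD B (K + 1 - j) 0) := by
        apply Int.ModEq.mul_right
        calc PySem.Int.mod (PySem.Int.mod (p' * q') R * e') R
            ≡ PySem.Int.mod (p' * q') R * e' [ZMOD R] := pymod_modeq _ _
          _ ≡ p' * q' * e' [ZMOD R] := Int.ModEq.mul_right _ (pymod_modeq _ _)
      exact hA.trans hB.symm
    rw [hs]
    exact ih bA _ p' q' e' hb'

-- The staged zip-sum over three prefix-product tables equals the reference 4-tuple fold.
lemma staged_eq (R : Int) (F1 F2 F3 F4 : Int → Int) :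
    ∀ (js : List Int) (p q e s : Int),
      (List.zip (scanMod p (js.map F1) R) (List.zip (scanMod q (js.map F2) R)
          (List.zip (scanMod e (js.map F3) R) (js.map F4)))).foldl
        (fun s t =>
          PySem.Int.mod (s + PySem.Int.mod (PySem.Int.mod (t.1 * t.2.1) R * t.2.2.1) R * t.2.2.2) R)
        s
      = (js.foldl
          (fun (st : Int × Int × Int × Int) j =>
            (PySem.Int.mod (st.1 * F1 j) R,
              PySem.Int.mod (st.2.1 * F2 j) R,
              PySem.Int.mod (st.2.2.1 * F3 j) R,
              PySem.Int.mod
                (st.2.2.2 + PySem.Int.mod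
                    (PySem.Int.mod
                      (PySem.Int.mod (st.1 * F1 j) R * PySem.Int.mod (st.2.1 * F2 j) R) R
                      * PySem.Int.mod (st.2.2.1 * F3 j) R) R * F4 j) R))
          (p, q, e, s)).2.2.2 := by
  intro js
  induction js with
  | nil => intro p q e s; rfl
  | cons j js ih =>
    intro p q e s
    simp only [List.map_cons, scanMod, List.zip_cons_cons, List.foldl_cons]
    exact ih _ _ _ _

-- reversed(B[:m]) as a map over the ascending range, when 0 ≤ m ≤ len(B).
lemma rev_slice_eq (B : List Int) (m : Int) (hm : 0 ≤ m) (hle : m ≤ (B.length : Int)) :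
    (PySem.List.slice B none (some m)).reverse
      = (PySem.List.pyRange 1 (m + 1) 1).map (fun j => PySem.List.pyGetD B (m - j) 0) := by
  rw [PySem.List.slice_to B hm]
  apply List.ext_getElem
  · simp [PySem.List.length_pyRange_one]
    omega
  · intro i h1 h2
    have hlen : (List.take m.toNat B).length = m.toNat := by
      simp; omega
    simp only [List.getElem_reverse, List.getElem_map, PySem.List.getElem_pyRange_one]
    have hi : i < m.toNat := by
      simpa [hlen] using h1
    rw [PySem.List.pyGetD_eq_getElem _ _ (by omega) (by omega)]
    rw [List.getElem_take]
    congr 1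
    omega

-- replicate as a map over the range.
lemma repeat_eq_map (n1 m : Int) :
    PySem.List.pyRepeat [n1] m
      = (PySem.List.pyRange 1 (m + 1) 1).map (fun _ => n1) := by
  rw [PySem.List.pyRepeat_singleton, List.map_const', PySem.List.length_pyRange_one]
  congr 1
  omega

-- ===== VERDICT (by name: the statement is the Claim_ definition above) =====
theorem highwayConstruction_spec : Claim_equal_highwayConstruction := by
  intro n K B R _ hpre
  unfold Spec_highwayConstruction highwayConstruction highwayConstruction_alt
  by_cases hn : n > 2
  · rw [if_pos hn, if_neg (by omega)]
    simp only []
    by_cases hK : K < 0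
    · -- empty ranges on both sides: both sums are 0
      rw [PySem.List.pyRange_neg_one_eq_nil (by omega),
        PySem.List.pyRange_one_eq_nil (by omega)]
      simp [scanMod, pyDiv]
    · -- 0 ≤ K; Pre_ gives R ≠ 0 and K < len(B)
      have hKB : K < (B.length : Int) := by
        rcases hpre with h | ⟨_, h | h⟩ <;> omega
      rw [range_reflect K]
      rw [loop_rel K R (PySem.Int.mod (n - 1) R) B (PySem.List.pyRange 1 (K + 2) 1) 1 0 1 1 1
        (by norm_num)]
      rw [repeat_eq_map (PySem.Int.mod (n - 1) R) (K + 1),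
        rev_slice_eq B (K + 1) (by omega) (by omega)]
      rw [staged_eq R (fun j => K + 1 + 1 - j) (fun j => pyInv j R)
        (fun _ => PySem.Int.mod (n - 1) R) (fun j => PySem.List.pyGetD B (K + 1 - j) 0)
        (PySem.List.pyRange 1 (K + 1 + 1) 1) 1 1 1 0]
      have : K + 1 + 1 = K + 2 := by ring
      rw [this]
      rfl
  · rw [if_neg hn, if_pos (by omega)]
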